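-- pv_equiv track=rewrite | github.com/joshanashakya/dissertation | workspace/dataset/java-python/GeeksForGeeks/2602/A/2.py | getNumMonotone
-- ===== SOURCE A (Python) =====
-- DP_s = 9
--
-- def getNumMonotone(ln):
--
--     # DP[i][j] is going to store monotone
--     # numbers of length i+1 considering
--     # j+1 digits.
--     DP = [[0]*DP_s for i in range(ln)]
--
--     # Unit length numbers
--     for i in range(DP_s):
--         DP[0][i] = i + 1
--
--     # Single digit numbers
--     for i in range(ln):
--         DP[i][0] = 1
--
--     # Filling rest of the entries
--     # in bottom up manner.
--     for i in range(1, ln):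
--
--         for j in range(1, DP_s):
--             DP[i][j] = DP[i - 1][j] + DP[i][j - 1]
--
--     return DP[ln - 1][DP_s - 1]
-- ===== SOURCE B (Python) =====
-- def getNumMonotone(ln):
--     # closed form: the binomial coefficient C(ln+8, 8), as a product divided by 40320
--     p = 1
--     for k in range(1, 9):
--         p *= ln + k
--     return p // 40320
-- ===== Notes on version B (the rewrite author's own statement) =====
-- stated objective: faster
-- what changed: replaces the O(ln*9) dynamic-programming table with the closed-form binomial coefficient C(ln+8,8) computed as a product-over-40320 formula
-- outside the precondition, e.g. on getNumMonotone(0): A raises IndexError, B returns 1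
import Mathlib
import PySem

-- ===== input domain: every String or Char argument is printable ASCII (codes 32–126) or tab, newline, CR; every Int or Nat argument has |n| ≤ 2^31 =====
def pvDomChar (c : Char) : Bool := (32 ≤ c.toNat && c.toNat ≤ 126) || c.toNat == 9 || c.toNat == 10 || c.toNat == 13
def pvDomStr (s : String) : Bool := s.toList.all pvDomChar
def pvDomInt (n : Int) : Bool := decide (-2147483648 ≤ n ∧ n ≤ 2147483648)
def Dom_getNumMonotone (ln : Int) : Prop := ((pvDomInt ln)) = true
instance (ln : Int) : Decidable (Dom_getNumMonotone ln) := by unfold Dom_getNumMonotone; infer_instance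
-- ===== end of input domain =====

-- B replaces the dynamic-programming table of A by the closed-form binomial coefficient C(ln+8, 8) (objective: faster).

-- ===== PORT A =====
-- literal transliteration of A: builds the ln×9 DP table row by row.
-- The table DP is held as an Array of rows (a Python list is an array); row indexing DP[i]
-- is done with .toNat/getD/setIfInBounds, exact for the nonnegative in-range indices these
-- loops use (Python raises IndexError only when ln ≤ 0, which Pre_ excludes).
def getNumMonotone (ln : Int) : Int :=
  let DP : Array (List Int) := ((PySem.List.pyRange 0 ln 1).map (fun _ => List.replicate 9 (0 : Int))).toArray
  let DP := (PySem.List.pyRange 0 9 1).foldl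
      (fun DP i => DP.setIfInBounds 0 (PySem.List.pySetD (DP.getD 0 []) i (i + 1))) DP
  let DP := (PySem.List.pyRange 0 ln 1).foldl
      (fun DP i => DP.setIfInBounds i.toNat (PySem.List.pySetD (DP.getD i.toNat []) 0 1)) DP
  let DP := (PySem.List.pyRange 1 ln 1).foldl (fun DP i =>
      (PySem.List.pyRange 1 9 1).foldl (fun DP j =>
        DP.setIfInBounds i.toNat (PySem.List.pySetD (DP.getD i.toNat []) j
          (PySem.List.pyGetD (DP.getD (i - 1).toNat []) j 0 +
           PySem.List.pyGetD (DP.getD i.toNat []) (j - 1) 0))) DP) DP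
  PySem.List.pyGetD (DP.getD (ln - 1).toNat []) (9 - 1) 0

-- ===== PORT B =====
def getNumMonotone_alt (ln : Int) : Int :=
  let p := (PySem.List.pyRange 1 9 1).foldl (fun p k => p * (ln + k)) 1
  PySem.Int.floordiv p 40320

-- ===== PRECONDITION & SPEC =====
-- Pre_ excludes ln ≤ 0, on which A raises IndexError (DP = [] is indexed at row 0).
def Pre_getNumMonotone (ln : Int) : Prop := 1 ≤ ln
instance (ln : Int) : Decidable (Pre_getNumMonotone ln) := by unfold Pre_getNumMonotone; infer_instance
def pvWitness_getNumMonotone : Int := (3)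

def Spec_getNumMonotone (ln : Int) (out : Int) : Prop := out = getNumMonotone_alt ln
instance (ln : Int) (out : Int) : Decidable (Spec_getNumMonotone ln out) := by unfold Spec_getNumMonotone; infer_instance

-- ===== CLAIM (what is proved, stated in full; the proofs are below) =====
def Claim_equal_getNumMonotone : Prop := ∀ (ln : Int), Dom_getNumMonotone ln → Pre_getNumMonotone ln → Spec_getNumMonotone ln (getNumMonotone ln)

-- ===== LEMMAS AND PROOFS =====

-- row r of the filled table: entry j is C(r+j+1, j)
def rowC (r : Nat) : List Int := (List.range 9).map (fun j => (((r + j + 1).choose j : Nat) : Int))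

-- partially filled row-i during the inner loop: entries < j are C(i+t+1, t), rest 0
def cRow (i j : Nat) : List Int :=
  (List.range 9).map (fun t => if t < j then (((i + t + 1).choose t : Nat) : Int) else 0)

lemma getD_map_range {α : Type} (N i : Nat) (f : Nat → α) (d : α) (hi : i < N) :
    PySem.List.pyGetD ((List.range N).map f) (i : Int) d = f i := by
  rw [PySem.List.pyGetD_natCast]
  simp [List.getD, hi]

lemma setD_map_range {α : Type} (N i : Nat) (f : Nat → α) (v : α) :
    PySem.List.pySetD ((List.range N).map f) (i : Int) v
      = (List.range N).map (fun r => if r = i then v else f r) := by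
  rw [PySem.List.pySetD_natCast]
  apply List.ext_getElem
  · simp
  · intro j h1 h2
    simp only [List.getElem_set, List.getElem_map, List.getElem_range]
    by_cases h : i = j
    · subst h; simp
    · simp [h, Ne.symm h]

lemma getD_map_range0 {α : Type} (N : Nat) (f : Nat → α) (d : α) (h : 0 < N) :
    PySem.List.pyGetD ((List.range N).map f) 0 d = f 0 := by
  rw [show (0 : Int) = ((0 : Nat) : Int) from rfl]
  exact getD_map_range N 0 f d h

lemma setD_map_range0 {α : Type} (N : Nat) (f : Nat → α) (v : α) :
    PySem.List.pySetD ((List.range N).map f) 0 v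
      = (List.range N).map (fun r => if r = 0 then v else f r) := by
  rw [show (0 : Int) = ((0 : Nat) : Int) from rfl]
  exact setD_map_range N 0 f v

lemma map_range_congr {α : Type} (N : Nat) (f g : Nat → α) (h : ∀ r, r < N → f r = g r) :
    (List.range N).map f = (List.range N).map g :=
  List.map_congr_left (fun r hr => h r (List.mem_range.mp hr))

-- generic loop lemma: folding a body over range(a, m) through an invariant family P
lemma foldl_pyRange_inv {σ : Type} (body : σ → Int → σ) (P : Nat → σ) (a m : Nat) (ha : a ≤ m)
    (hbody : ∀ i : Nat, a ≤ i → i < m → body (P i) (i : Int) = P (i + 1)) :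
    (PySem.List.pyRange (a : Int) (m : Int) 1).foldl body (P a) = P m := by
  induction m with
  | zero =>
    have : a = 0 := by omega
    subst this
    simp [PySem.List.pyRange_one_eq_nil]
  | succ m ih =>
    by_cases h : a = m + 1
    · subst h
      rw [PySem.List.pyRange_one_eq_nil (by omega)]
      rfl
    · have ham : a ≤ m := by omega
      have : ((m + 1 : Nat) : Int) = (m : Int) + 1 := by push_cast; ring
      rw [this, PySem.List.pyRange_one_succ_right (by exact_mod_cast ham), List.foldl_append,
        ih ham (fun i h1 h2 => hbody i h1 (by omega))]
      simpa using hbody m ham (by omega)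

-- the same loop lemma with Int endpoints, as they appear in the port
lemma foldl_pyRange_inv' {σ : Type} (body : σ → Int → σ) (P : Nat → σ) (a m : Int)
    (h0 : 0 ≤ a) (ha : a ≤ m)
    (hbody : ∀ i : Nat, a ≤ (i : Int) → (i : Int) < m → body (P i) (i : Int) = P (i + 1)) :
    (PySem.List.pyRange a m 1).foldl body (P a.toNat) = P m.toNat := by
  obtain ⟨a', rfl⟩ : ∃ a' : Nat, a = (a' : Int) := ⟨a.toNat, by omega⟩
  obtain ⟨m', rfl⟩ : ∃ m' : Nat, m = (m' : Int) := ⟨m.toNat, by omega⟩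
  simpa using foldl_pyRange_inv body P a' m' (by omega)
    (fun i h1 h2 => hbody i (by omega) (by omega))

-- bridges between the Array the port threads and the List the invariant proofs use
lemma arr_getD (l : List (List Int)) (i : Nat) : l.toArray.getD i [] = l.getD i [] := by
  by_cases h : i < l.length <;> simp [Array.getD, h, List.getD]

lemma arr_setD (l : List (List Int)) (i : Nat) (v : List Int) :
    l.toArray.setIfInBounds i v = (l.set i v).toArray := by simp

lemma foldl_toArray {α : Type} (xs : List Int) (bA : Array α → Int → Array α)
    (bL : List α → Int → List α) (h : ∀ l i, i ∈ xs → bA l.toArray i = (bL l i).toArray)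
    (l0 : List α) : xs.foldl bA l0.toArray = (xs.foldl bL l0).toArray := by
  induction xs generalizing l0 with
  | nil => rfl
  | cons x xs ih =>
    simp only [List.foldl_cons]
    rw [h l0 x (by simp), ih (fun l i hi => h l i (by simp [hi]))]

lemma pyGetD_nonneg_toNat (l : List (List Int)) (i : Int) (h : 0 ≤ i) :
    PySem.List.pyGetD l i [] = l.getD i.toNat [] := by
  rw [show i = ((i.toNat : Nat) : Int) by omega, PySem.List.pyGetD_natCast]
  simp
  rw [show (max i 0).toNat = i.toNat by omega]

lemma pySetD_nonneg_toNat (l : List (List Int)) (i : Int) (v : List Int) (h : 0 ≤ i) :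
    PySem.List.pySetD l i v = l.set i.toNat v := by
  rw [show i = ((i.toNat : Nat) : Int) by omega, PySem.List.pySetD_natCast]
  simp
  rw [show (max i 0).toNat = i.toNat by omega]

-- the three loop bodies of A
def bodyA1 (DP : List (List Int)) (i : Int) : List (List Int) :=
  PySem.List.pySetD DP 0 (PySem.List.pySetD (PySem.List.pyGetD DP 0 []) i (i + 1))
def bodyA2 (DP : List (List Int)) (i : Int) : List (List Int) :=
  PySem.List.pySetD DP i (PySem.List.pySetD (PySem.List.pyGetD DP i []) 0 1)
def bodyA3 (DP : List (List Int)) (i : Int) : List (List Int) :=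
  (PySem.List.pyRange 1 9 1).foldl (fun DP j =>
    PySem.List.pySetD DP i (PySem.List.pySetD (PySem.List.pyGetD DP i []) j
      (PySem.List.pyGetD (PySem.List.pyGetD DP (i - 1) []) j 0 +
       PySem.List.pyGetD (PySem.List.pyGetD DP i []) (j - 1) 0))) DP

-- invariant families for the three loops
def P1 (N i : Nat) : List (List Int) :=
  (List.range N).map (fun r => if r = 0 then (List.range 9).map (fun j => if j < i then ((j : Int) + 1) else 0) else List.replicate 9 0)
def P2 (N m : Nat) : List (List Int) :=
  (List.range N).map (fun r => if r < m then (if r = 0 then rowC 0 else [1,0,0,0,0,0,0,0,0]) else (if r = 0 then rowC 0 else List.replicate 9 0))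
def P3 (N m : Nat) : List (List Int) :=
  (List.range N).map (fun r => if r < m then rowC r else [1,0,0,0,0,0,0,0,0])

lemma loop1_step (N i : Nat) (hN : 1 ≤ N) (hi : i < 9) : bodyA1 (P1 N i) (i : Int) = P1 N (i + 1) := by
  unfold bodyA1 P1
  rw [getD_map_range0 N _ _ (by omega)]
  simp only [reduceIte]
  rw [setD_map_range, setD_map_range0]
  apply map_range_congr
  intro r hr
  by_cases hr0 : r = 0
  · subst hr0
    norm_num
    intro t ht
    by_cases hti : t = i
    · subst hti; simp
    · simp only [if_neg hti]
      by_cases h1 : t < i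
      · simp [h1, show t ≤ i by omega]
      · simp [h1, show ¬ t ≤ i by omega, show ¬ t < i + 1 by omega]
  · simp [hr0]

lemma loop2_step (N i : Nat) (hi : i < N) : bodyA2 (P2 N i) (i : Int) = P2 N (i + 1) := by
  unfold bodyA2 P2
  rw [getD_map_range N i _ _ hi, setD_map_range]
  apply map_range_congr
  intro r hr
  by_cases hri : r = i
  · subst hri
    simp only [if_pos rfl, lt_irrefl, if_neg (lt_irrefl r), if_pos (show r < r + 1 by omega)]
    by_cases hr0 : r = 0
    · subst hr0; simp only [if_pos rfl]; decide
    · simp only [if_neg hr0]; decide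
  · simp only [if_neg hri]
    by_cases h1 : r < i
    · simp [h1, show r < i + 1 by omega]
    · simp [h1, show ¬ r < i + 1 by omega]

-- Pascal step for the inner loop, entry j (1 ≤ j ≤ 8)
lemma pascal_entry (i j : Nat) (hj : 1 ≤ j) :
    ((i + j).choose j : Int) + ((i + (j - 1) + 1).choose (j - 1) : Nat) = ((i + j + 1).choose j : Nat) := by
  obtain ⟨j', rfl⟩ : ∃ j', j = j' + 1 := ⟨j - 1, by omega⟩
  have h : (i + (j' + 1) + 1).choose (j' + 1) = (i + (j' + 1)).choose j' + (i + (j' + 1)).choose (j' + 1) :=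
    Nat.choose_succ_succ (i + (j' + 1)) j'
  have h2 : i + (j' + 1 - 1) + 1 = i + (j' + 1) := by omega
  rw [h2]
  push_cast [h]
  ring

lemma inner_step (N i j : Nat) (h1 : 1 ≤ i) (hiN : i < N) (hj1 : 1 ≤ j) (hj : j < 9) :
    (fun DP (jj : Int) =>
      PySem.List.pySetD DP (i : Int) (PySem.List.pySetD (PySem.List.pyGetD DP (i : Int) []) jj
        (PySem.List.pyGetD (PySem.List.pyGetD DP ((i : Int) - 1) []) jj 0 +
         PySem.List.pyGetD (PySem.List.pyGetD DP (i : Int) []) (jj - 1) 0)))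
      ((List.range N).map (fun r => if r = i then cRow i j else (if r < i then rowC r else [1,0,0,0,0,0,0,0,0]))) (j : Int)
    = (List.range N).map (fun r => if r = i then cRow i (j + 1) else (if r < i then rowC r else [1,0,0,0,0,0,0,0,0])) := by
  have hcast : ((i : Int) - 1) = ((i - 1 : Nat) : Int) := by omega
  have hjcast : ((j : Int) - 1) = ((j - 1 : Nat) : Int) := by omega
  simp only [hcast, hjcast]
  rw [getD_map_range N i _ _ hiN, getD_map_range N (i - 1) _ _ (by omega)]
  simp only [if_pos rfl, if_true, reduceIte, if_neg (show ¬ (i - 1 = i) by omega), if_pos (show i - 1 < i by omega)]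
  unfold cRow rowC
  rw [getD_map_range 9 j _ _ hj, getD_map_range 9 (j - 1) _ _ (by omega),
    setD_map_range, setD_map_range]
  simp only [if_pos (show j - 1 < j by omega)]
  apply map_range_congr
  intro r hr
  by_cases hri : r = i
  · subst hri
    simp only [if_pos rfl, if_true, reduceIte]
    apply map_range_congr
    intro t ht
    by_cases htj : t = j
    · subst htj
      simp only [if_pos rfl, if_pos (show t < t + 1 by omega)]
      have h2 : r - 1 + t + 1 = r + t := by omega
      rw [h2]
      exact pascal_entry r t hj1
    · simp only [if_neg htj]
      by_cases hlt : t < j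
      · simp [hlt, show t < j + 1 by omega]
      · simp [hlt, show ¬ t < j + 1 by omega]
  · simp [hri]

lemma loop3_step (N i : Nat) (h1 : 1 ≤ i) (hi : i < N) : bodyA3 (P3 N i) (i : Int) = P3 N (i + 1) := by
  unfold bodyA3
  have start : P3 N i = (List.range N).map (fun r => if r = i then cRow i 1 else (if r < i then rowC r else [1,0,0,0,0,0,0,0,0])) := by
    unfold P3
    apply map_range_congr
    intro r hr
    by_cases hri : r = i
    · subst hri
      simp only [if_neg (lt_irrefl r), if_pos rfl]
      unfold cRow
      rw [show List.range 9 = [0,1,2,3,4,5,6,7,8] from rfl]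
      simp
    · by_cases hlt : r < i
      · simp [hri, hlt]
      · simp [hri, hlt]
  rw [start]
  rw [show ((List.range N).map (fun r => if r = i then cRow i 1 else (if r < i then rowC r else [1,0,0,0,0,0,0,0,0])))
      = (fun j => (List.range N).map (fun r => if r = i then cRow i j else (if r < i then rowC r else [1,0,0,0,0,0,0,0,0]))) ((1 : Int).toNat) from rfl]
  rw [foldl_pyRange_inv' _
    (fun j => (List.range N).map (fun r => if r = i then cRow i j else (if r < i then rowC r else [1,0,0,0,0,0,0,0,0])))
    1 9 (by norm_num) (by norm_num)
    (fun j hj1 hj9 => inner_step N i j h1 hi (by omega) (by omega))]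
  unfold P3
  apply map_range_congr
  intro r hr
  by_cases hri : r = i
  · subst hri
    simp only [if_pos rfl, if_pos (show r < r + 1 by omega)]
    unfold cRow rowC
    apply map_range_congr
    intro t ht
    simp [ht]
  · by_cases hlt : r < i
    · simp [hri, hlt, show r < i + 1 by omega]
    · simp [hri, hlt, show ¬ r < i + 1 by omega]

-- A computes C(N+8, 8)
lemma portA_eq_choose (N : Nat) (hN : 1 ≤ N) :
    getNumMonotone (N : Int) = (((N + 8).choose 8 : Nat) : Int) := by
  unfold getNumMonotone
  have hinit : (PySem.List.pyRange 0 (N : Int) 1).map (fun _ => List.replicate 9 (0 : Int)) = P1 N 0 := by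
    rw [PySem.List.pyRange_zero_natCast]
    unfold P1
    rw [List.map_map]
    apply map_range_congr
    intro r hr
    by_cases hr0 : r = 0
    · subst hr0; simp only [Function.comp]; decide
    · simp [hr0]
  have hb1 : ∀ (l : List (List Int)) (i : Int), i ∈ PySem.List.pyRange 0 9 1 →
      (fun (DP : Array (List Int)) (i : Int) =>
        DP.setIfInBounds 0 (PySem.List.pySetD (DP.getD 0 []) i (i + 1))) l.toArray i
      = (bodyA1 l i).toArray := by
    intro l i _
    unfold bodyA1
    dsimp only
    rw [arr_getD, arr_setD, PySem.List.pyGetD_zero,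
      pySetD_nonneg_toNat l 0 _ (by omega)]
    norm_num
  have hb2 : ∀ (l : List (List Int)) (i : Int), i ∈ PySem.List.pyRange 0 (N : Int) 1 →
      (fun (DP : Array (List Int)) (i : Int) =>
        DP.setIfInBounds i.toNat (PySem.List.pySetD (DP.getD i.toNat []) 0 1)) l.toArray i
      = (bodyA2 l i).toArray := by
    intro l i hi
    have h0 : 0 ≤ i := ((PySem.List.mem_pyRange_one).mp hi).1
    unfold bodyA2
    dsimp only
    rw [arr_getD, arr_setD, pyGetD_nonneg_toNat l i h0, pySetD_nonneg_toNat l i _ h0]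
  have hb3 : ∀ (l : List (List Int)) (i : Int), i ∈ PySem.List.pyRange 1 (N : Int) 1 →
      (fun (DP : Array (List Int)) (i : Int) =>
        (PySem.List.pyRange 1 9 1).foldl (fun (DP : Array (List Int)) (j : Int) =>
          DP.setIfInBounds i.toNat (PySem.List.pySetD (DP.getD i.toNat []) j
            (PySem.List.pyGetD (DP.getD (i - 1).toNat []) j 0 +
             PySem.List.pyGetD (DP.getD i.toNat []) (j - 1) 0))) DP) l.toArray i
      = (bodyA3 l i).toArray := by
    intro l i hi
    have h1i : 1 ≤ i := ((PySem.List.mem_pyRange_one).mp hi).1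
    unfold bodyA3
    exact foldl_toArray _ _ _ (fun l' j _ => by
      rw [arr_getD, arr_getD, arr_setD, pyGetD_nonneg_toNat l' i (by omega),
        pyGetD_nonneg_toNat l' (i - 1) (by omega), pySetD_nonneg_toNat l' i _ (by omega)]) l
  have l1 : (PySem.List.pyRange 0 9 1).foldl bodyA1 (P1 N 0) = P1 N 9 := by
    exact foldl_pyRange_inv' bodyA1 (P1 N) 0 9 (by norm_num) (by norm_num)
      (fun i _ hi => loop1_step N i hN (by omega))
  have e12 : P1 N 9 = P2 N 0 := by
    unfold P1 P2
    apply map_range_congr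
    intro r hr
    by_cases hr0 : r = 0
    · subst hr0
      simp only [if_pos rfl, if_neg (show ¬ ((0 : Nat) < 0) by omega)]
      unfold rowC
      decide
    · simp [hr0]
  have l2 : (PySem.List.pyRange 0 (N : Int) 1).foldl bodyA2 (P2 N 0) = P2 N N := by
    have := foldl_pyRange_inv' bodyA2 (P2 N) 0 (N : Int) (by norm_num) (by omega)
      (fun i _ hi => loop2_step N i (by omega))
    simpa using this
  have e23 : P2 N N = P3 N 1 := by
    unfold P2 P3
    apply map_range_congr
    intro r hr
    by_cases hr0 : r = 0
    · subst hr0; simp [hr]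
    · simp [hr, hr0, show ¬ r < 1 by omega]
  have l3 : (PySem.List.pyRange 1 (N : Int) 1).foldl bodyA3 (P3 N 1) = P3 N N := by
    have := foldl_pyRange_inv' bodyA3 (P3 N) 1 (N : Int) (by norm_num) (by exact_mod_cast hN)
      (fun i hi1 hiN => loop3_step N i (by omega) (by omega))
    simpa using this
  have main : PySem.List.pyGetD
      (((PySem.List.pyRange 1 (N : Int) 1).foldl (fun (DP : Array (List Int)) (i : Int) =>
          (PySem.List.pyRange 1 9 1).foldl (fun (DP : Array (List Int)) (j : Int) =>
            DP.setIfInBounds i.toNat (PySem.List.pySetD (DP.getD i.toNat []) j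
              (PySem.List.pyGetD (DP.getD (i - 1).toNat []) j 0 +
               PySem.List.pyGetD (DP.getD i.toNat []) (j - 1) 0))) DP)
        ((PySem.List.pyRange 0 (N : Int) 1).foldl (fun (DP : Array (List Int)) (i : Int) =>
            DP.setIfInBounds i.toNat (PySem.List.pySetD (DP.getD i.toNat []) 0 1))
          ((PySem.List.pyRange 0 9 1).foldl (fun (DP : Array (List Int)) (i : Int) =>
              DP.setIfInBounds 0 (PySem.List.pySetD (DP.getD 0 []) i (i + 1)))
            (((PySem.List.pyRange 0 (N : Int) 1).map (fun _ => List.replicate 9 (0 : Int))).toArray)))).getD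
        ((N : Int) - 1).toNat []) (9 - 1) 0 = (((N + 8).choose 8 : Nat) : Int) := by
    rw [hinit,
      foldl_toArray (PySem.List.pyRange 0 9 1)
        (fun (DP : Array (List Int)) (i : Int) =>
          DP.setIfInBounds 0 (PySem.List.pySetD (DP.getD 0 []) i (i + 1))) bodyA1 hb1 (P1 N 0),
      foldl_toArray (PySem.List.pyRange 0 (N : Int) 1)
        (fun (DP : Array (List Int)) (i : Int) =>
          DP.setIfInBounds i.toNat (PySem.List.pySetD (DP.getD i.toNat []) 0 1)) bodyA2 hb2 _,
      foldl_toArray (PySem.List.pyRange 1 (N : Int) 1)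
        (fun (DP : Array (List Int)) (i : Int) =>
          (PySem.List.pyRange 1 9 1).foldl (fun (DP : Array (List Int)) (j : Int) =>
            DP.setIfInBounds i.toNat (PySem.List.pySetD (DP.getD i.toNat []) j
              (PySem.List.pyGetD (DP.getD (i - 1).toNat []) j 0 +
               PySem.List.pyGetD (DP.getD i.toNat []) (j - 1) 0))) DP) bodyA3 hb3 _,
      arr_getD]
    rw [l1, e12, l2, e23, l3, show ((N : Int) - 1).toNat = N - 1 by omega]
    unfold P3
    rw [show ((List.range N).map (fun r => if r < N then rowC r else [1,0,0,0,0,0,0,0,0])).getD (N - 1) []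
        = (if N - 1 < N then rowC (N - 1) else [1,0,0,0,0,0,0,0,0]) by
      simp [List.getD, show N - 1 < N by omega]]
    simp only [if_pos (show N - 1 < N by omega)]
    unfold rowC
    have h8 : (9 - 1 : Int) = ((8 : Nat) : Int) := by norm_num
    rw [h8, getD_map_range 9 8 _ _ (by omega)]
    rw [show N - 1 + 8 + 1 = N + 8 by omega]
  exact main

-- B computes C(N+8, 8)
lemma portB_eq_choose (N : Nat) :
    getNumMonotone_alt (N : Int) = (((N + 8).choose 8 : Nat) : Int) := by
  unfold getNumMonotone_alt
  have hr : PySem.List.pyRange 1 9 1 = [1, 2, 3, 4, 5, 6, 7, 8] := by decide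
  rw [hr]
  simp only [List.foldl]
  have hd : (N + 8).descFactorial 8 = (N+1)*(N+2)*(N+3)*(N+4)*(N+5)*(N+6)*(N+7)*(N+8) := by
    simp only [Nat.descFactorial_succ, Nat.descFactorial_zero,
      show N + 8 - 0 = N + 8 from rfl, show N + 8 - 1 = N + 7 by omega,
      show N + 8 - 2 = N + 6 by omega, show N + 8 - 3 = N + 5 by omega,
      show N + 8 - 4 = N + 4 by omega, show N + 8 - 5 = N + 3 by omega,
      show N + 8 - 6 = N + 2 by omega, show N + 8 - 7 = N + 1 by omega]
    ring
  have hp : (1 * ((N : Int) + 1) * ((N : Int) + 2) * ((N : Int) + 3) * ((N : Int) + 4) * ((N : Int) + 5) * ((N : Int) + 6) * ((N : Int) + 7) * ((N : Int) + 8))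
      = ((40320 * (N + 8).choose 8 : Nat) : Int) := by
    rw [show (40320 : Nat) * (N + 8).choose 8 = (N + 8).descFactorial 8 by
      rw [Nat.descFactorial_eq_factorial_mul_choose]; norm_num [Nat.factorial]]
    rw [hd]
    push_cast
    ring
  rw [hp, PySem.Int.floordiv_eq_ediv_of_pos (by norm_num)]
  push_cast
  rw [mul_comm]
  exact Int.mul_ediv_cancel _ (by norm_num)

-- ===== VERDICT (by name: the statement is the Claim_ definition above) =====
theorem getNumMonotone_spec : Claim_equal_getNumMonotone := by
  intro ln _ hpre
  unfold Pre_getNumMonotone at hpre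
  unfold Spec_getNumMonotone
  obtain ⟨N, rfl⟩ : ∃ N : Nat, ln = (N : Int) := ⟨ln.toNat, by omega⟩
  have hN : 1 ≤ N := by exact_mod_cast hpre
  rw [portA_eq_choose N hN, portB_eq_choose N]
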